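-- pv_equiv track=rewrite | github.com/jordyjwilliams/advent_of_code | 2020/day_15/day_15_solution.py | get_last_elements
-- ===== SOURCE A (Python) =====
-- import typing as ty
--
-- def get_last_elements(
--     data: ty.List[int], target: int, number_of_elements: int = 2
-- ) -> ty.List[int]:
--     """Gets (most recent) last number_of_elements in a list which are equal to target
--
--     Parameters
--     ----------
--     data : list
--         of data to search through
--     target : int
--         number to target
--     number_of_elements : int
--         how many integers to obtain the indicesr
--
--     Returns
--     -------
--     elements : list
--         of idxes of data which are equal to target
--
--     Notes
--     -----
--     Previously was used, not currently in use by this solution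
--     Use was omitted due to an increased performance in other ways
--     """
--     elements = []
--     # Search backwards through the data
--     for idx, num in enumerate(data[::-1]):
--         if len(elements) >= number_of_elements:
--             break
--         if num == target:
--             elements.append(idx)
--     return elements
-- ===== SOURCE B (Python) =====
-- import typing as ty
--
-- def get_last_elements(
--     data: ty.List[int], target: int, number_of_elements: int = 2
-- ) -> ty.List[int]:
--     """Forward scan: collect reversed indices of matches, then keep the last
--     number_of_elements of them (most-recent-first)."""
--     if number_of_elements <= 0:
--         return []
--     n = len(data)
--     hits = [n - 1 - i for i, x in enumerate(data) if x == target]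
--     return list(reversed(hits[-number_of_elements:]))
-- ===== Notes on version B (the rewrite author's own statement) =====
-- stated objective: simpler
-- what changed: Replaces A's backward enumerate-and-break accumulator loop with a forward comprehension collecting reversed indices of all matches, followed by a tail slice and reversal; no early break, no incremental length test.
import Mathlib
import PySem

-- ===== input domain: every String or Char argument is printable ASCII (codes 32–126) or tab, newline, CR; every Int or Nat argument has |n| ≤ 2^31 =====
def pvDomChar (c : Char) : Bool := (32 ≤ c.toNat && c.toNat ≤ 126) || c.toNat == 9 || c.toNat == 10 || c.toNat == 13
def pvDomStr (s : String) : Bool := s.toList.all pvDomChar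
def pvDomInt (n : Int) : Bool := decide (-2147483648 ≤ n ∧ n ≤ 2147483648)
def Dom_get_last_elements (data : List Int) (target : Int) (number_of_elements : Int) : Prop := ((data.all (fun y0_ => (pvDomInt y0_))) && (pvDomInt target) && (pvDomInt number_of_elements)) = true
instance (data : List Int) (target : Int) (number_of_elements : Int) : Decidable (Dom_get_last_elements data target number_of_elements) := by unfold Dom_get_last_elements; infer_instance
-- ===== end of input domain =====

-- B replaces A's backward break-loop with a forward comprehension plus a tail slice (objective: simpler).


-- ===== PORT A =====
-- A's for-loop over enumerate(data[::-1]) with an early break once enough indices are collected.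
def pvALoop (l : List (Int × Int)) (target : Int) (k : Int) (elements : List Int) : List Int :=
  match l with
  | [] => elements
  | (idx, num) :: rest =>
    if (elements.length : Int) ≥ k then elements
    else if num = target then pvALoop rest target k (elements ++ [idx])
    else pvALoop rest target k elements

def get_last_elements (data : List Int) (target : Int) (number_of_elements : Int) : List Int :=
  -- data[::-1] is data.reverse; enumerate as in Python
  pvALoop (PySem.List.enumerate data.reverse 0) target number_of_elements []

-- ===== PORT B =====
def get_last_elements_alt (data : List Int) (target : Int) (number_of_elements : Int) : List Int :=
  if number_of_elements ≤ 0 then []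
  else
    let n : Int := data.length
    let hits := ((PySem.List.enumerate data 0).filter (fun p => p.2 == target)).map
      (fun p => n - 1 - p.1)
    -- hits[-k:] for k > 0 is drop (hits.length - k) with Nat subtraction (exact)
    (hits.drop (hits.length - number_of_elements.toNat)).reverse

-- ===== PRECONDITION & SPEC =====
def Spec_get_last_elements (data : List Int) (target : Int) (number_of_elements : Int) (out : List Int) : Prop := out = get_last_elements_alt data target number_of_elements
instance (data : List Int) (target : Int) (number_of_elements : Int) (out : List Int) : Decidable (Spec_get_last_elements data target number_of_elements out) := by unfold Spec_get_last_elements; infer_instance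

-- ===== CLAIM (what is proved, stated in full; the proofs are below) =====
def Claim_equal_get_last_elements : Prop := ∀ (data : List Int) (target : Int) (number_of_elements : Int), Dom_get_last_elements data target number_of_elements → Spec_get_last_elements data target number_of_elements (get_last_elements data target number_of_elements)

-- ===== LEMMAS AND PROOFS =====

-- first components of the matching entries of l
def pvHits (l : List (Int × Int)) (target : Int) : List Int :=
  (l.filter (fun p => p.2 == target)).map (·.1)

theorem pvALoop_eq_take (l : List (Int × Int)) (target k : Int) (elements : List Int) :
    pvALoop l target k elements
      = elements ++ (pvHits l target).take ((k - elements.length).toNat) := by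
  induction l generalizing elements with
  | nil => simp [pvALoop, pvHits]
  | cons p rest ih =>
    obtain ⟨idx, num⟩ := p
    by_cases hlen : (elements.length : Int) ≥ k
    · have : (k - (elements.length : Int)).toNat = 0 := by omega
      simp [pvALoop, hlen, this]
    · by_cases hnum : num = target
      · have htn : (k - (elements.length : Int)).toNat
            = ((k - ((elements ++ [idx]).length : Int)).toNat) + 1 := by
          simp only [List.length_append, List.length_singleton]; omega
        simp [pvALoop, hlen, hnum, ih, pvHits, htn, List.take_succ_cons]
      · simp [pvALoop, hlen, ih, pvHits, hnum]

theorem pvEnumerate_shift (xs : List Int) (s : Int) :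
    PySem.List.enumerate xs (s + 1)
      = (PySem.List.enumerate xs s).map (fun p => (p.1 + 1, p.2)) := by
  induction xs generalizing s with
  | nil => simp [PySem.List.enumerate_nil]
  | cons x xs ih => simp [PySem.List.enumerate_cons, ih]

theorem pvEnumerate_append (l1 l2 : List Int) (s : Int) :
    PySem.List.enumerate (l1 ++ l2) s
      = PySem.List.enumerate l1 s ++ PySem.List.enumerate l2 (s + l1.length) := by
  induction l1 generalizing s with
  | nil => simp [PySem.List.enumerate_nil]
  | cons x l1 ih =>
    simp [PySem.List.enumerate_cons, ih]
    ring_nf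

theorem pvEnumerate_reverse (xs : List Int) :
    PySem.List.enumerate xs.reverse 0
      = ((PySem.List.enumerate xs 0).map
          (fun p => ((xs.length : Int) - 1 - p.1, p.2))).reverse := by
  induction xs with
  | nil => simp [PySem.List.enumerate_nil]
  | cons x xs ih =>
    rw [List.reverse_cons, pvEnumerate_append]
    have h1 : PySem.List.enumerate [x] (0 + (xs.reverse.length : Int))
        = [((xs.length : Int), x)] := by
      simp [PySem.List.enumerate_cons, PySem.List.enumerate_nil]
    rw [h1, ih]
    have h2 : PySem.List.enumerate (x :: xs) 0 = (0, x) :: PySem.List.enumerate xs 1 := by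
      simp [PySem.List.enumerate_cons]
    rw [h2]
    have h3 : PySem.List.enumerate xs (1 : Int)
        = (PySem.List.enumerate xs 0).map (fun p => (p.1 + 1, p.2)) := by
      have := pvEnumerate_shift xs 0
      simpa using this
    simp only [List.map_cons, List.reverse_cons, h3, List.map_map]
    congr 1
    · congr 1
      refine List.map_congr_left (fun p _ => ?_)
      simp [Function.comp, List.length_cons]
      ring
    · simp [List.length_cons]

theorem pvHits_reverse (data : List Int) (target : Int) :
    pvHits (PySem.List.enumerate data.reverse 0) target
      = (((PySem.List.enumerate data 0).filter (fun p => p.2 == target)).map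
          (fun p => (data.length : Int) - 1 - p.1)).reverse := by
  rw [pvHits, pvEnumerate_reverse, List.filter_reverse, List.map_reverse,
    List.filter_map, List.map_map]
  congr 1

-- ===== VERDICT (by name: the statement is the Claim_ definition above) =====
theorem get_last_elements_spec : Claim_equal_get_last_elements := by
  intro data target k _
  show _ = _
  rw [get_last_elements, get_last_elements_alt, pvALoop_eq_take, pvHits_reverse]
  simp only [List.nil_append, List.length_nil, Int.natCast_zero, sub_zero]
  by_cases hk : k ≤ 0
  · have h0 : k.toNat = 0 := by omega
    simp [hk, h0]
  · rw [if_neg hk, List.reverse_drop]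
    rw [List.take_eq_take_min (i := k.toNat)]
    congr 1
    simp
    omega
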